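-- pv_equiv track=rewrite | github.com/posl/comment_recommendation | script/split_gen/5_time/zh/216_C/2.py | solve
-- ===== SOURCE A (Python) =====
-- def solve(n):
--     if n == 0:
--         return 'A'
--     if n == 1:
--         return 'B'
--     if n % 2 == 0:
--         return solve(n // 2) + 'B'
--     else:
--         return solve(n - 1) + 'A'
-- ===== SOURCE B (Python) =====
-- def solve(n):
--     chars = []
--     while n > 1:
--         if n % 2 == 0:
--             chars.append('B')
--             n //= 2
--         else:
--             chars.append('A')
--             n -= 1
--     chars.append('A' if n == 0 else 'B')
--     return ''.join(reversed(chars))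
-- ===== Notes on version B (the rewrite author's own statement) =====
-- stated objective: alternative
-- what changed: Replaced A's suffix-building recursion with an iterative while-loop that collects the characters forward in a list and reverses once at the end.
import Mathlib
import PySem

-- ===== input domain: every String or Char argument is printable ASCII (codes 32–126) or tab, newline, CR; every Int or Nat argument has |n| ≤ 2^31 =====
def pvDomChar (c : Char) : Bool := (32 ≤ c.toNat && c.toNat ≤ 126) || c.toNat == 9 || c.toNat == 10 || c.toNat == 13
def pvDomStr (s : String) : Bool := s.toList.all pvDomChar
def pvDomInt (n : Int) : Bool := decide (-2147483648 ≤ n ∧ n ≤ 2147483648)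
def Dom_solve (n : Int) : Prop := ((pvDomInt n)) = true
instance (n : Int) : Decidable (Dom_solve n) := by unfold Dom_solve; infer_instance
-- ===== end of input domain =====

-- B replaces A's suffix-building recursion by an iterative accumulator loop reversed once at the end (objective: alternative decomposition).

-- ===== PORT A =====
-- A's recursion, on Nat: for n ≥ 0 (Pre_solve) Python's // and % on n agree with Nat's / and %;
-- on negative n the Python recursion never returns (outside Pre_solve), so nothing is claimed there.
def solveNat (n : Nat) : String :=
  if n == 0 then "A"
  else if n == 1 then "B"
  else if n % 2 == 0 then solveNat (n / 2) ++ "B"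
  else solveNat (n - 1) ++ "A"
termination_by n
decreasing_by all_goals simp_all; omega

def solve (n : Int) : String := solveNat n.toNat

-- ===== PORT B =====
-- the while-loop of Source B: state is (n, chars); appends to the end of chars like list.append
def altLoop (n : Int) (chars : List Char) : Int × List Char :=
  if n > 1 then
    if PySem.Int.mod n 2 == 0 then altLoop (PySem.Int.floordiv n 2) (chars ++ ['B'])
    else altLoop (n - 1) (chars ++ ['A'])
  else (n, chars)
termination_by n.toNat
decreasing_by
  · rw [PySem.Int.floordiv_eq_ediv_of_pos (by omega)]; omega
  · omega

def solve_alt (n : Int) : String :=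
  let p := altLoop n []
  String.ofList ((p.2 ++ [if p.1 == 0 then 'A' else 'B']).reverse)

-- ===== PRECONDITION & SPEC =====
-- Pre_solve excludes negative n, on which the Python A recurses without a base case (RecursionError).
def Pre_solve (n : Int) : Prop := 0 ≤ n
instance (n : Int) : Decidable (Pre_solve n) := by unfold Pre_solve; infer_instance
def pvWitness_solve : Int := (6)

def Spec_solve (n : Int) (out : String) : Prop := out = solve_alt n
instance (n : Int) (out : String) : Decidable (Spec_solve n out) := by unfold Spec_solve; infer_instance

-- ===== CLAIM (what is proved, stated in full; the proofs are below) =====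
def Claim_equal_solve : Prop := ∀ (n : Int), Dom_solve n → Pre_solve n → Spec_solve n (solve n)

-- ===== LEMMAS AND PROOFS =====

-- the loop accumulates: its output list is the initial accumulator followed by what it produces from []
theorem altLoop_append (n : Int) (acc : List Char) :
    altLoop n acc = ((altLoop n []).1, acc ++ (altLoop n []).2) := by
  induction hk : n.toNat using Nat.strong_induction_on generalizing n acc with
  | _ k ih =>
    subst hk
    rw [altLoop.eq_def]
    conv_rhs => rw [altLoop.eq_def (chars := [])]
    simp only [List.nil_append]
    split
    · rename_i h
      split
      · rw [ih (PySem.Int.floordiv n 2).toNat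
              (by rw [PySem.Int.floordiv_eq_ediv_of_pos (by omega)]; omega) _ _ rfl,
            ih (PySem.Int.floordiv n 2).toNat
              (by rw [PySem.Int.floordiv_eq_ediv_of_pos (by omega)]; omega) _ ['B'] rfl]
        simp
      · rw [ih (n - 1).toNat (by omega) _ _ rfl, ih (n - 1).toNat (by omega) _ ['A'] rfl]
        simp
    · simp

theorem key (n : Int) (hn : 0 ≤ n) :
    solveNat n.toNat =
      String.ofList (((altLoop n []).2 ++ [if (altLoop n []).1 == 0 then 'A' else 'B']).reverse) := by
  induction hk : n.toNat using Nat.strong_induction_on generalizing n with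
  | _ k ih =>
    subst hk
    rw [solveNat]
    conv_rhs => rw [altLoop.eq_def]
    by_cases h0 : n = 0
    · subst h0; simp
    by_cases h1 : n = 1
    · subst h1; simp
    have hgt : n > 1 := by omega
    have hn0 : ¬ (n.toNat == 0) = true := by simp; omega
    have hn1 : ¬ (n.toNat == 1) = true := by simp; omega
    simp only [if_neg hn0, if_neg hn1, if_pos hgt]
    have hmod : PySem.Int.mod n 2 = n % 2 := PySem.Int.mod_eq_emod_of_pos (by omega)
    have hdiv : PySem.Int.floordiv n 2 = n / 2 := PySem.Int.floordiv_eq_ediv_of_pos (by omega)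
    by_cases he : n % 2 = 0
    · have heb : (n.toNat % 2 == 0) = true := by simp; omega
      simp only [if_pos heb, hmod, hdiv]
      rw [if_pos (by simp [he])]
      simp only [List.nil_append]
      simp only [altLoop_append (n / 2) ['B']]
      have : n.toNat / 2 = (n / 2).toNat := by omega
      rw [this, ih (n / 2).toNat (by omega) _ (by omega) rfl]
      rw [← String.toList_inj]; simp
    · have heb : ¬ (n.toNat % 2 == 0) = true := by simp; omega
      simp only [if_neg heb, hmod, hdiv]
      rw [if_neg (by simp [he])]
      simp only [List.nil_append]
      simp only [altLoop_append (n - 1) ['A']]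
      have : n.toNat - 1 = (n - 1).toNat := by omega
      rw [this, ih (n - 1).toNat (by omega) _ (by omega) rfl]
      rw [← String.toList_inj]; simp

-- ===== VERDICT (by name: the statement is the Claim_ definition above) =====
theorem solve_spec : Claim_equal_solve := by
  intro n _ hp
  unfold Spec_solve solve solve_alt
  exact key n hp
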